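-- pv_equiv track=rewrite | github.com/Sheshiyer/brandmint-oracle-aleph | scripts/update-release-docs.py | detect_bump_type
-- ===== SOURCE A (Python) =====
-- from typing import Dict, List, Optional, Set, Tuple
--
-- def detect_bump_type(commits: List[str]) -> str:
--     """Detect version bump type from commit messages."""
--     for msg in commits:
--         lower = msg.lower()
--         if "breaking" in lower or "major:" in lower:
--             return "major"
--     for msg in commits:
--         lower = msg.lower()
--         if lower.startswith("feat") or "feature" in lower:
--             return "minor"
--     return "patch"
-- ===== SOURCE B (Python) =====
-- def detect_bump_type(commits):
--     """Detect version bump type from commit messages (single pass)."""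
--     minor_seen = False
--     for msg in commits:
--         lower = msg.lower()
--         if "breaking" in lower or "major:" in lower:
--             return "major"
--         if lower.startswith("feat") or "feature" in lower:
--             minor_seen = True
--     return "minor" if minor_seen else "patch"
-- ===== Notes on version B (the rewrite author's own statement) =====
-- stated objective: simpler
-- what changed: Replaces A's two full scans over the commit list with one single pass that returns 'major' immediately and records a minor_seen flag, deciding minor/patch after the loop.
import Mathlib
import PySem

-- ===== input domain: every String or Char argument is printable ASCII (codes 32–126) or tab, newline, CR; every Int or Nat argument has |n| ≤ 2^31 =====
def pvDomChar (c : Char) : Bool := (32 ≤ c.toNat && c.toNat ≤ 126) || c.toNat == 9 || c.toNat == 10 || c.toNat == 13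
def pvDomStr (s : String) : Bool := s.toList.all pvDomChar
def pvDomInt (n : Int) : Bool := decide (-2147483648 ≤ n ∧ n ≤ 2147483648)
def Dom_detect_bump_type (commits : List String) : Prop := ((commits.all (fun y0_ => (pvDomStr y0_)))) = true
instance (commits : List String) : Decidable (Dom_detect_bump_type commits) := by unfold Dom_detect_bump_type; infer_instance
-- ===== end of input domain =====

-- B merges A's two full scans into one single pass with a minor_seen flag (objective: simpler).

-- ===== PORT A =====
-- first loop of A: early return "major"
def pvLoopMajor : List String → Option String
  | [] => none
  | msg :: rest =>
    let lower := PySem.Str.lower msg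
    if PySem.Str.isIn "breaking" lower || PySem.Str.isIn "major:" lower then some "major"
    else pvLoopMajor rest

-- second loop of A: early return "minor"
def pvLoopMinor : List String → Option String
  | [] => none
  | msg :: rest =>
    let lower := PySem.Str.lower msg
    if PySem.Str.startswith lower "feat" || PySem.Str.isIn "feature" lower then some "minor"
    else pvLoopMinor rest

def detect_bump_type (commits : List String) : String :=
  match pvLoopMajor commits with
  | some v => v
  | none =>
    match pvLoopMinor commits with
    | some v => v
    | none => "patch"

-- ===== PORT B =====
-- single pass: return "major" immediately, else accumulate minor_seen
def pvLoopOnce : List String → Bool → String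
  | [], minorSeen => if minorSeen then "minor" else "patch"
  | msg :: rest, minorSeen =>
    let lower := PySem.Str.lower msg
    if PySem.Str.isIn "breaking" lower || PySem.Str.isIn "major:" lower then "major"
    else if PySem.Str.startswith lower "feat" || PySem.Str.isIn "feature" lower then
      pvLoopOnce rest true
    else pvLoopOnce rest minorSeen

def detect_bump_type_alt (commits : List String) : String :=
  pvLoopOnce commits false

-- ===== PRECONDITION & SPEC =====
def Spec_detect_bump_type (commits : List String) (out : String) : Prop := out = detect_bump_type_alt commits
instance (commits : List String) (out : String) : Decidable (Spec_detect_bump_type commits out) := by unfold Spec_detect_bump_type; infer_instance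

-- ===== CLAIM (what is proved, stated in full; the proofs are below) =====
def Claim_equal_detect_bump_type : Prop := ∀ (commits : List String), Dom_detect_bump_type commits → Spec_detect_bump_type commits (detect_bump_type commits)

-- ===== LEMMAS AND PROOFS =====
def pvIsMajor (msg : String) : Bool :=
  PySem.Str.isIn "breaking" (PySem.Str.lower msg) || PySem.Str.isIn "major:" (PySem.Str.lower msg)

def pvIsMinor (msg : String) : Bool :=
  PySem.Str.startswith (PySem.Str.lower msg) "feat" || PySem.Str.isIn "feature" (PySem.Str.lower msg)

theorem pvLoopMajor_eq (cs : List String) :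
    pvLoopMajor cs = if cs.any pvIsMajor then some "major" else none := by
  induction cs with
  | nil => simp [pvLoopMajor]
  | cons m r ih =>
    simp only [pvLoopMajor, List.any_cons, pvIsMajor]
    by_cases h : (PySem.Str.isIn "breaking" (PySem.Str.lower m) || PySem.Str.isIn "major:" (PySem.Str.lower m)) = true
    · simp only [h]; simp
    · rw [Bool.not_eq_true] at h
      simp only [h]; simpa using ih

theorem pvLoopMinor_eq (cs : List String) :
    pvLoopMinor cs = if cs.any pvIsMinor then some "minor" else none := by
  induction cs with
  | nil => simp [pvLoopMinor]
  | cons m r ih =>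
    simp only [pvLoopMinor, List.any_cons, pvIsMinor]
    by_cases h : (PySem.Str.startswith (PySem.Str.lower m) "feat" || PySem.Str.isIn "feature" (PySem.Str.lower m)) = true
    · simp only [h]; simp
    · rw [Bool.not_eq_true] at h
      simp only [h]; simpa using ih

theorem pvLoopOnce_eq (cs : List String) (flag : Bool) :
    pvLoopOnce cs flag =
      if cs.any pvIsMajor then "major"
      else if flag || cs.any pvIsMinor then "minor" else "patch" := by
  induction cs generalizing flag with
  | nil => cases flag <;> simp [pvLoopOnce]
  | cons m r ih =>
    simp only [pvLoopOnce, List.any_cons, pvIsMajor, pvIsMinor]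
    by_cases h1 : (PySem.Str.isIn "breaking" (PySem.Str.lower m) || PySem.Str.isIn "major:" (PySem.Str.lower m)) = true
    · simp only [h1]; simp
    · rw [Bool.not_eq_true] at h1
      by_cases h2 : (PySem.Str.startswith (PySem.Str.lower m) "feat" || PySem.Str.isIn "feature" (PySem.Str.lower m)) = true
      · simp only [h1, h2]; cases flag <;> simp [ih]
      · rw [Bool.not_eq_true] at h2
        simp only [h1, h2]; simpa using ih flag

-- ===== VERDICT (by name: the statement is the Claim_ definition above) =====
theorem detect_bump_type_spec : Claim_equal_detect_bump_type := by
  intro commits _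
  unfold Spec_detect_bump_type detect_bump_type detect_bump_type_alt
  rw [pvLoopMajor_eq, pvLoopMinor_eq, pvLoopOnce_eq]
  by_cases h1 : commits.any pvIsMajor <;> by_cases h2 : commits.any pvIsMinor <;> simp [h1, h2]
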